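-- pv_equiv track=rewrite | github.com/chadepl/paper-multimodal-contour-depth | archive/test_interval_depth.py | interval_counting_1
-- ===== SOURCE A (Python) =====
-- def interval_counting_1(numbers, index):
--     count = 0
--     target_num = numbers[index]
--     for i, a in enumerate(numbers):
--         for j, b in enumerate(numbers):
--             if i != j:
--                 if a <= target_num and b >= target_num:
--                     count += 1
--     return count
-- ===== SOURCE B (Python) =====
-- def interval_counting_1(numbers, index):
--     target = numbers[index]
--     le = ge = eq = 0
--     for x in numbers:
--         if x <= target:
--             le += 1
--         if x >= target:
--             ge += 1
--         if x == target:
--             eq += 1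
--     return le * ge - eq
-- ===== Notes on version B (the rewrite author's own statement) =====
-- stated objective: faster
-- what changed: Replaces the O(n^2) double loop over all ordered pairs by a single counting pass (L = #{x<=t}, G = #{x>=t}, E = #{x==t}) and the closed form L*G - E.
import Mathlib
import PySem

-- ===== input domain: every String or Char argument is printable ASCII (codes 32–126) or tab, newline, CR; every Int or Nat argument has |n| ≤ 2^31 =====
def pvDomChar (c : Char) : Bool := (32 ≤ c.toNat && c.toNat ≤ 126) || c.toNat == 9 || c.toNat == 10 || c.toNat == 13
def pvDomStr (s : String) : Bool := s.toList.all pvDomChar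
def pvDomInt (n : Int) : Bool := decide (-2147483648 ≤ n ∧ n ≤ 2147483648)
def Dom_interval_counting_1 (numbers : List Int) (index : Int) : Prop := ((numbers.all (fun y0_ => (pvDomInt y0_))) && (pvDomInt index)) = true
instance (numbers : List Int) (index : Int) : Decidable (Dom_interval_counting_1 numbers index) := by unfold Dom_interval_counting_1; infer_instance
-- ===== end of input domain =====

-- B replaces A's O(n^2) double loop by one counting pass and the closed form L*G - E.

-- ===== PORT A =====
def interval_counting_1 (numbers : List Int) (index : Int) : Int :=
  let target_num := (PySem.List.pyGet? numbers index).getD 0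
  (PySem.List.enumerate numbers).foldl (fun count p =>
    (PySem.List.enumerate numbers).foldl (fun count q =>
      if p.1 ≠ q.1 then
        if p.2 ≤ target_num ∧ q.2 ≥ target_num then count + 1 else count
      else count) count) 0

-- ===== PORT B =====
def interval_counting_1_alt (numbers : List Int) (index : Int) : Int :=
  let target := (PySem.List.pyGet? numbers index).getD 0
  let s := numbers.foldl (fun (s : Int × Int × Int) x =>
      (s.1 + (if x ≤ target then 1 else 0),
       s.2.1 + (if x ≥ target then 1 else 0),
       s.2.2 + (if x = target then 1 else 0))) (0, 0, 0)
  s.1 * s.2.1 - s.2.2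

-- ===== PRECONDITION & SPEC =====
-- Pre_ excludes exactly the inputs where numbers[index] raises IndexError (both A and B raise there).
def Pre_interval_counting_1 (numbers : List Int) (index : Int) : Prop :=
  PySem.Raise.InRange numbers.length index
instance (numbers : List Int) (index : Int) : Decidable (Pre_interval_counting_1 numbers index) := by
  unfold Pre_interval_counting_1; infer_instance

def pvWitness_interval_counting_1 : List Int × Int := ([2, 1, 3], 0)

def Spec_interval_counting_1 (numbers : List Int) (index : Int) (out : Int) : Prop := out = interval_counting_1_alt numbers index
instance (numbers : List Int) (index : Int) (out : Int) : Decidable (Spec_interval_counting_1 numbers index out) := by unfold Spec_interval_counting_1; infer_instance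

-- ===== CLAIM (what is proved, stated in full; the proofs are below) =====
def Claim_equal_interval_counting_1 : Prop := ∀ (numbers : List Int) (index : Int), Dom_interval_counting_1 numbers index → Pre_interval_counting_1 numbers index → Spec_interval_counting_1 numbers index (interval_counting_1 numbers index)

-- ===== LEMMAS AND PROOFS =====

-- the three counts B maintains, as countP
def pvLE (t : Int) (xs : List Int) : Int := (xs.countP (fun x => decide (x ≤ t)) : Int)
def pvGE (t : Int) (xs : List Int) : Int := (xs.countP (fun x => decide (x ≥ t)) : Int)
def pvEQ (t : Int) (xs : List Int) : Int := (xs.countP (fun x => decide (x = t)) : Int)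

-- B's fold computes the three counts
theorem pv_fold_counts (t : Int) (xs : List Int) (l g e : Int) :
    xs.foldl (fun (s : Int × Int × Int) x =>
      (s.1 + (if x ≤ t then 1 else 0),
       s.2.1 + (if x ≥ t then 1 else 0),
       s.2.2 + (if x = t then 1 else 0))) (l, g, e)
    = (l + pvLE t xs, g + pvGE t xs, e + pvEQ t xs) := by
  induction xs generalizing l g e with
  | nil => simp [pvLE, pvGE, pvEQ]
  | cons x xs ih =>
      simp only [List.foldl_cons, ih, pvLE, pvGE, pvEQ, List.countP_cons]
      by_cases h1 : x ≤ t <;> by_cases h2 : x ≥ t <;> by_cases h3 : x = t <;>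
        simp [h1, h2, h3, Prod.mk.injEq] <;> push_cast <;> omega

-- A's inner loop adds the number of pairs (j,b) in l with j ≠ i, a ≤ t, b ≥ t
theorem pv_inner (t i a : Int) (l : List (Int × Int)) (c : Int) :
    l.foldl (fun count q =>
        if i ≠ q.1 then
          if a ≤ t ∧ q.2 ≥ t then count + 1 else count
        else count) c
    = c + (l.countP (fun q => decide (i ≠ q.1) && (decide (a ≤ t) && decide (q.2 ≥ t))) : Int) := by
  induction l generalizing c with
  | nil => simp
  | cons q l ih =>
      simp only [List.foldl_cons, List.countP_cons, ih]
      by_cases h1 : i ≠ q.1 <;> by_cases h2 : a ≤ t ∧ q.2 ≥ t <;>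
        simp [h1, h2] <;> push_cast <;> omega

-- an index strictly below the enumerate start never matches
theorem pv_count_enum_lt (xs : List Int) (s i : Int) (h : i < s) (P : Int → Bool) :
    (PySem.List.enumerate xs s).countP (fun q => decide (i ≠ q.1) && P q.2)
      = xs.countP P := by
  induction xs generalizing s with
  | nil => simp [PySem.List.enumerate_nil]
  | cons x xs ih =>
      have hne : i ≠ s := by omega
      simp only [PySem.List.enumerate_cons, List.countP_cons]
      rw [ih (s + 1) (by omega)]
      simp [hne]

-- removing the single index s + k from enumerate removes one occurrence of xs[k]
theorem pv_count_enum_at (xs : List Int) (s : Int) (k : Nat) (hk : k < xs.length) (P : Int → Bool) :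
    ((PySem.List.enumerate xs s).countP (fun q => decide (s + (k : Int) ≠ q.1) && P q.2) : Int)
      = (xs.countP P : Int) - (if P xs[k] then 1 else 0) := by
  induction xs generalizing s k with
  | nil => simp at hk
  | cons x xs ih =>
      cases k with
      | zero =>
          have h0 : ¬ (s + ((0 : Nat) : Int) ≠ s) := by omega
          simp only [PySem.List.enumerate_cons, List.countP_cons, h0]
          rw [pv_count_enum_lt xs (s + 1) (s + ((0 : Nat) : Int)) (by omega) P]
          simp [List.countP_cons]
          by_cases h : P x <;> simp [h]
      | succ k =>
          have hrw : s + ((k + 1 : Nat) : Int) = (s + 1) + (k : Int) := by push_cast; ring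
          have hd : (s + 1) + (k : Int) ≠ s := by omega
          simp only [PySem.List.enumerate_cons, List.countP_cons, hrw,
            List.getElem_cons_succ]
          push_cast
          have hk' : k < xs.length := by simpa using Nat.lt_of_succ_lt_succ hk
          rw [ih (s + 1) k hk']
          by_cases h : P x <;> by_cases h2 : P (xs[k]'hk') <;> simp [h, h2, hd] <;> omega

-- per-element contribution of A's outer loop, as a function of the element only
def pvG (t : Int) (xs : List Int) (a : Int) : Int :=
  if a ≤ t then pvGE t xs - (if a ≥ t then 1 else 0) else 0

theorem pv_inner_value (t : Int) (xs : List Int) (k : Nat) (hk : k < xs.length) :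
    ((PySem.List.enumerate xs 0).countP
        (fun q => decide ((0 : Int) + (k : Int) ≠ q.1) && (decide (xs[k] ≤ t) && decide (q.2 ≥ t))) : Int)
      = pvG t xs xs[k] := by
  by_cases h : xs[k] ≤ t
  · have := pv_count_enum_at xs 0 k hk (fun b => decide (b ≥ t))
    simp only [pvG, pvGE, h, if_pos, decide_true, Bool.true_and] at this ⊢
    simpa using this
  · simp [pvG, h, List.countP_eq_zero]

-- sum of per-element contributions equals the closed form L*G - E
theorem pv_map_sum (t : Int) (ys xs : List Int) :
    (xs.map (pvG t ys)).sum = pvLE t xs * pvGE t ys - pvEQ t xs := by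
  induction xs with
  | nil => simp [pvLE, pvEQ]
  | cons x xs ih =>
      simp only [List.map_cons, List.sum_cons, ih, pvLE, pvEQ, List.countP_cons, pvG]
      by_cases h1 : x ≤ t <;> by_cases h2 : x ≥ t <;> by_cases h3 : x = t <;>
        first
        | (exfalso; omega)
        | (simp [h1, h2, h3] <;> push_cast <;> ring_nf <;> omega)

-- A's outer fold, rewritten with the per-element contribution
theorem pv_outer (t : Int) (xs : List Int) (l : List (Int × Int)) (c : Int)
    (hl : ∀ p ∈ l, ∃ k : Nat, ∃ _ : k < xs.length, p = ((0 : Int) + (k : Int), xs[k])) :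
    l.foldl (fun count p =>
      (PySem.List.enumerate xs 0).foldl (fun count q =>
        if p.1 ≠ q.1 then
          if p.2 ≤ t ∧ q.2 ≥ t then count + 1 else count
        else count) count) c
    = c + (l.map (fun p => pvG t xs p.2)).sum := by
  induction l generalizing c with
  | nil => simp
  | cons p l ih =>
      obtain ⟨k, hk, rfl⟩ := hl p (by simp)
      simp only [List.foldl_cons, List.map_cons, List.sum_cons]
      rw [pv_inner t ((0 : Int) + (k : Int)) xs[k] (PySem.List.enumerate xs 0) c,
        pv_inner_value t xs k hk, ih _ (fun q hq => hl q (by simp [hq]))]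
      ring

theorem pv_map_snd (xs : List Int) (s : Int) (f : Int → Int) :
    (PySem.List.enumerate xs s).map (fun p => f p.2) = xs.map f := by
  induction xs generalizing s with
  | nil => simp [PySem.List.enumerate_nil]
  | cons x xs ih => simp [PySem.List.enumerate_cons, ih]

theorem pv_ports_eq (xs : List Int) (t : Int) :
    (PySem.List.enumerate xs).foldl (fun count p =>
      (PySem.List.enumerate xs).foldl (fun count q =>
        if p.1 ≠ q.1 then
          if p.2 ≤ t ∧ q.2 ≥ t then count + 1 else count
        else count) count) 0
    = pvLE t xs * pvGE t xs - pvEQ t xs := by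
  rw [pv_outer t xs (PySem.List.enumerate xs 0) 0
      (fun p hp => by
        rw [PySem.List.mem_enumerate_iff] at hp
        obtain ⟨k, hk, rfl⟩ := hp
        exact ⟨k, hk, rfl⟩)]
  rw [pv_map_snd, pv_map_sum]
  ring

-- ===== VERDICT (by name: the statement is the Claim_ definition above) =====
theorem interval_counting_1_spec : Claim_equal_interval_counting_1 := by
  intro numbers index _ _
  unfold Spec_interval_counting_1
  simp only [interval_counting_1, interval_counting_1_alt, pv_ports_eq, pv_fold_counts]
  ring
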